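-- pv_equiv track=rewrite | github.com/buh07/ReactionTimeGame | scripts/simulate_data.py | build_player_names
-- ===== SOURCE A (Python) =====
-- def build_player_names(count: int) -> list[str]:
--     base = [
--         "alpha", "bravo", "charlie", "delta", "echo", "foxtrot", "golf", "hotel",
--         "india", "juliet", "kilo", "lima", "mike", "november", "oscar", "papa",
--         "quebec", "romeo", "sierra", "tango", "uniform", "victor", "whiskey", "xray",
--         "yankee", "zulu",
--     ]
--     names: list[str] = []
--     for i in range(count):
--         token = base[i % len(base)]
--         suffix = i // len(base)
--         names.append(token if suffix == 0 else f"{token}{suffix}")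
--     return names
-- ===== SOURCE B (Python) =====
-- def build_player_names(count: int) -> list[str]:
--     base = [
--         "alpha", "bravo", "charlie", "delta", "echo", "foxtrot", "golf", "hotel",
--         "india", "juliet", "kilo", "lima", "mike", "november", "oscar", "papa",
--         "quebec", "romeo", "sierra", "tango", "uniform", "victor", "whiskey", "xray",
--         "yankee", "zulu",
--     ]
--     names: list[str] = []
--     suffix = 0
--     remaining = count
--     while remaining > 0:
--         for token in base[:remaining]:
--             names.append(token if suffix == 0 else f"{token}{suffix}")
--         remaining -= len(base)
--         suffix += 1
--     return names
-- ===== Notes on version B (the rewrite author's own statement) =====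
-- stated objective: alternative
-- what changed: Replaced the single flat loop over range(count) that derives each suffix via i // 26 with nested rounds: an outer while loop over the suffix number that appends one (possibly truncated via base[:remaining]) pass over the base token list per round.
import Mathlib
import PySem

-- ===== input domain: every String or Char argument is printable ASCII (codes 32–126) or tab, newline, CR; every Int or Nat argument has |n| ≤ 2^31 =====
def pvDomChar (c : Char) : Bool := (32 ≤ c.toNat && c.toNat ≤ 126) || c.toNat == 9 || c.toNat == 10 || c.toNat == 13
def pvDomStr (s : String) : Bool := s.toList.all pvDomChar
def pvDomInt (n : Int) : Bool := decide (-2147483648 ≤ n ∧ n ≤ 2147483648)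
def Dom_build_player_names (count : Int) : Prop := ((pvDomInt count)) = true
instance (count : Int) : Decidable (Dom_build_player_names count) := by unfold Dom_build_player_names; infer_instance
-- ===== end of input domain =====

-- B replaces A's flat loop (suffix derived by i // 26) with nested rounds: an outer
-- suffix loop emitting one (possibly truncated) pass over the base list per round;
-- objective: alternative decomposition, same cost.

def pvBase : List String := [
  "alpha", "bravo", "charlie", "delta", "echo", "foxtrot", "golf", "hotel",
  "india", "juliet", "kilo", "lima", "mike", "november", "oscar", "papa",
  "quebec", "romeo", "sierra", "tango", "uniform", "victor", "whiskey", "xray",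
  "yankee", "zulu"]

-- ===== PORT A =====
def build_player_names (count : Int) : List String :=
  (PySem.List.pyRange 0 count 1).foldl (fun names i =>
    let token := PySem.List.pyGetD pvBase (PySem.Int.mod i (pvBase.length : Int)) ""
    let suffix := PySem.Int.floordiv i (pvBase.length : Int)
    names ++ [if suffix == 0 then token else token ++ PySem.Int.toStr suffix]) []

-- ===== PORT B =====
-- one round of B's while loop: append (a prefix of) the base tokens with the current
-- suffix, then recurse with remaining reduced by len(base)
def pvAltGo (suffix remaining : Int) (names : List String) : List String :=
  if _h : 0 < remaining then
    pvAltGo (suffix + 1) (remaining - (pvBase.length : Int))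
      ((PySem.List.slice pvBase none (some remaining)).foldl
        (fun acc token => acc ++ [if suffix == 0 then token else token ++ PySem.Int.toStr suffix])
        names)
  else names
termination_by remaining.toNat
decreasing_by
  have h26 : (pvBase.length : Int) = 26 := by decide
  rw [h26]; omega

def build_player_names_alt (count : Int) : List String := pvAltGo 0 count []

-- ===== PRECONDITION & SPEC =====
def Spec_build_player_names (count : Int) (out : List String) : Prop := out = build_player_names_alt count
instance (count : Int) (out : List String) : Decidable (Spec_build_player_names count out) := by unfold Spec_build_player_names; infer_instance

-- ===== CLAIM (what is proved, stated in full; the proofs are below) =====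
def Claim_equal_build_player_names : Prop := ∀ (count : Int), Dom_build_player_names count → Spec_build_player_names count (build_player_names count)

-- ===== LEMMAS AND PROOFS =====

-- the name produced for flat index k (A's view, in Nat form)
def pvName (k : Nat) : String :=
  if k / 26 = 0 then pvBase.getD (k % 26) ""
  else pvBase.getD (k % 26) "" ++ PySem.Int.toStr ((k / 26 : Nat) : Int)

lemma pvAltGo_nonpos (s r : Int) (acc : List String) (h : ¬ 0 < r) :
    pvAltGo s r acc = acc := by
  unfold pvAltGo
  rw [dif_neg h]

lemma pvTake_map (n s : Nat) (hn : n ≤ 26) :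
    (pvBase.take n).map
      (fun token => if ((s : Int) == 0) = true then token else token ++ PySem.Int.toStr (s : Int))
      = (List.range n).map (fun k => pvName (26 * s + k)) := by
  apply List.ext_getElem
  · simp [pvBase]; omega
  · intro k h1 h2
    have hk : k < n := by simpa using h2
    have hk26 : k < 26 := lt_of_lt_of_le hk hn
    have hkb : k < pvBase.length := by simp [pvBase]; omega
    have hdiv : (26 * s + k) / 26 = s := by omega
    have hmod : (26 * s + k) % 26 = k := by omega
    simp only [List.getElem_map, List.getElem_take, List.getElem_range, pvName, hdiv, hmod]
    by_cases hs : s = 0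
    · subst hs; simp [List.getD, hkb]
    · have hb : ((s : Int) == 0) = false := by
        simp only [beq_eq_false_iff_ne, ne_eq, Nat.cast_eq_zero]; exact hs
      simp [hb, hs, List.getD, hkb]

lemma pvAltGo_spec (n : Nat) : ∀ (s : Nat) (acc : List String),
    pvAltGo (s : Int) (n : Int) acc = acc ++ (List.range n).map (fun k => pvName (26 * s + k)) := by
  induction n using Nat.strong_induction_on with
  | _ n ih =>
    intro s acc
    by_cases hn : n = 0
    · subst hn; simp [pvAltGo_nonpos]
    · have hpos : (0 : Int) < (n : Int) := by exact_mod_cast Nat.pos_of_ne_zero hn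
      rw [pvAltGo, dif_pos hpos]
      rw [PySem.List.slice_to_natCast pvBase n, PySem.List.foldl_append_singleton_eq_map]
      by_cases hle : n ≤ 26
      · have hstop : ¬ (0 : Int) < (n : Int) - (pvBase.length : Int) := by
          have h26 : (pvBase.length : Int) = 26 := by decide
          rw [h26]; omega
        rw [pvAltGo_nonpos _ _ _ hstop, pvTake_map n s hle]
      · have hlen : (pvBase.length : Int) = 26 := by decide
        have htake : pvBase.take n = pvBase := List.take_of_length_le (by simp [pvBase]; omega)
        have hcast : (n : Int) - (pvBase.length : Int) = ((n - 26 : Nat) : Int) := by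
          rw [hlen]; omega
        have hcast2 : ((s : Int) + 1) = ((s + 1 : Nat) : Int) := by push_cast; ring
        rw [htake, hcast, hcast2, ih (n - 26) (by omega) (s + 1)]
        have hsplit : List.range n = List.range 26 ++ (List.range (n - 26)).map (26 + ·) := by
          rw [← List.range_add]; congr 1; omega
        rw [hsplit, List.map_append, List.map_map]
        have h26 : (List.range 26).map (fun k => pvName (26 * s + k)) = pvBase.map
            (fun token => if ((s : Int) == 0) = true then token else token ++ PySem.Int.toStr (s : Int)) := by
          rw [← pvTake_map 26 s (le_refl 26), List.take_of_length_le (by simp [pvBase])]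
        rw [← h26, List.append_assoc]
        congr 2
        apply List.map_congr_left
        intro k _
        simp only [Function.comp]
        congr 1
        omega

lemma pvA_elem (k : Nat) :
    (fun i => if (PySem.Int.floordiv i (pvBase.length : Int) == 0) = true
        then PySem.List.pyGetD pvBase (PySem.Int.mod i (pvBase.length : Int)) ""
        else PySem.List.pyGetD pvBase (PySem.Int.mod i (pvBase.length : Int)) ""
          ++ PySem.Int.toStr (PySem.Int.floordiv i (pvBase.length : Int))) ((0 : Int) + (k : Nat))
      = pvName k := by
  simp only [zero_add, show pvBase.length = 26 from rfl]
  rw [show ((26 : Nat) : Int) = (((26 : Nat) : Nat) : Int) from rfl]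
  rw [PySem.Int.floordiv_natCast k 26, PySem.Int.mod_natCast k 26, PySem.List.pyGetD_natCast]
  by_cases h : k / 26 = 0
  · simp [pvName, h]
  · have hb : (((k / 26 : Nat) : Int) == 0) = false := by
      simp only [beq_eq_false_iff_ne, ne_eq, Nat.cast_eq_zero]; exact h
    rw [hb]
    simp only [Bool.false_eq_true, if_false]
    unfold pvName
    rw [if_neg h]

theorem pv_main (count : Int) : build_player_names count = build_player_names_alt count := by
  unfold build_player_names build_player_names_alt
  by_cases hc : 0 < count
  · have hcnt : count = ((count.toNat : Nat) : Int) := by omega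
    have hB := pvAltGo_spec count.toNat 0 []
    simp only [Nat.cast_zero, Nat.mul_zero, Nat.zero_add, List.nil_append] at hB
    conv_rhs => rw [hcnt]
    rw [hB, PySem.List.pyRange_one, PySem.List.foldl_append_singleton_eq_map, List.map_map,
      sub_zero]
    apply List.map_congr_left
    intro k _
    exact pvA_elem k
  · rw [PySem.List.pyRange_one_eq_nil (by omega), pvAltGo_nonpos 0 count [] hc]
    rfl

-- ===== VERDICT (by name: the statement is the Claim_ definition above) =====
theorem build_player_names_spec : Claim_equal_build_player_names := by
  intro count _
  unfold Spec_build_player_names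
  exact pv_main count
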